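-- pv_equiv track=rewrite | github.com/comeillfoo/it_labs | it_lab2/29/cstranslator29.py | negaDecToDec
-- ===== SOURCE A (Python) =====
-- def parseInt(line):
--   dig = 0
--   for c in line: dig = dig*10 + ord(c)-48
--   return dig
--
-- def negaDecToDec(ndecnum):
--   # разворачиваем строковое представление числа
--   ndecnum = ndecnum[::-1]
--   dec = 1
--   buffer = 0
--   for c in ndecnum:
--     n = parseInt(c)
--     buffer += n*dec
--     dec *= -10
--   return str(buffer)
-- ===== SOURCE B (Python) =====
-- def negaDecToDec(ndecnum):
--   buffer = 0
--   for c in ndecnum: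
--     buffer = buffer * (-10) + (ord(c) - 48)
--   return str(buffer)
-- ===== Notes on version B (the rewrite author's own statement) =====
-- stated objective: idiomatic
-- what changed: B replaces A's string reversal plus separately maintained power-of-(-10) accumulator with a single left-to-right Horner pass (buffer = buffer*(-10) + digit), inlining the one-character parseInt call.
import Mathlib
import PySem

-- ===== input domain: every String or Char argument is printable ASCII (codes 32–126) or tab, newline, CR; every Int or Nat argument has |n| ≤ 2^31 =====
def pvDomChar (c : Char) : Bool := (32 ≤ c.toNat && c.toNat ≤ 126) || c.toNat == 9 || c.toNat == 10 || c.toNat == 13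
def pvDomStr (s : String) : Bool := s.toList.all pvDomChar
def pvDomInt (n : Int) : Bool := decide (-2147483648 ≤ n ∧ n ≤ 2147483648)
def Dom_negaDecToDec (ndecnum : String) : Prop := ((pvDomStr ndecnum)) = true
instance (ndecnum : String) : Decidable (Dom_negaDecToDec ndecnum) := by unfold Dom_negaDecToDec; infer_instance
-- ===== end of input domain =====

-- B replaces A's string reversal + power-of-(-10) accumulator with one left-to-right Horner pass (idiomatic; same cost).


-- ===== PORT A =====
-- parseInt: dig = 0; for c in line: dig = dig*10 + ord(c) - 48
def parseIntA (line : List Char) : Int :=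
  line.foldl (fun dig c => dig * 10 + (c.toNat : Int) - 48) 0

-- negaDecToDec: reverse the string, then accumulate buffer += parseInt(c)*dec; dec *= -10
def negaDecToDec (ndecnum : String) : String :=
  let rev := (PySem.Str.slice? ndecnum none none (-1)).getD ""   -- ndecnum[::-1]
  let st := rev.toList.foldl
    (fun (st : Int × Int) c =>
      let n := parseIntA [c]
      (st.1 * (-10), st.2 + n * st.1))
    (1, 0)   -- (dec, buffer)
  PySem.Int.toStr st.2

-- ===== PORT B =====
def negaDecToDec_alt (ndecnum : String) : String :=
  PySem.Int.toStr
    (ndecnum.toList.foldl (fun buffer c => buffer * (-10) + ((c.toNat : Int) - 48)) 0)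

-- ===== PRECONDITION & SPEC =====
def Spec_negaDecToDec (ndecnum : String) (out : String) : Prop := out = negaDecToDec_alt ndecnum
instance (ndecnum : String) (out : String) : Decidable (Spec_negaDecToDec ndecnum out) := by unfold Spec_negaDecToDec; infer_instance

-- ===== CLAIM (what is proved, stated in full; the proofs are below) =====
def Claim_equal_negaDecToDec : Prop := ∀ (ndecnum : String), Dom_negaDecToDec ndecnum → Spec_negaDecToDec ndecnum (negaDecToDec ndecnum)

-- ===== LEMMAS AND PROOFS =====

-- Horner fold (B's loop) starting from b, as a function of b
theorem horner_shift (l : List Char) : ∀ (b : Int),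
    l.foldl (fun buffer c => buffer * (-10) + ((c.toNat : Int) - 48)) b
      = b * (-10) ^ l.length + l.foldl (fun buffer c => buffer * (-10) + ((c.toNat : Int) - 48)) 0 := by
  induction l with
  | nil => intro b; simp
  | cons c t ih =>
    intro b
    simp only [List.foldl_cons, List.length_cons]
    rw [ih (b * (-10) + ((c.toNat : Int) - 48)), ih (0 * (-10) + ((c.toNat : Int) - 48))]
    ring

-- A's loop over the reversed list computes (dec·(-10)^n, buf + dec·Horner l)
theorem a_fold_eq (l : List Char) : ∀ (dec buf : Int),
    l.reverse.foldl
      (fun (st : Int × Int) c => (st.1 * (-10), st.2 + parseIntA [c] * st.1)) (dec, buf)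
      = (dec * (-10) ^ l.length,
         buf + dec * l.foldl (fun buffer c => buffer * (-10) + ((c.toNat : Int) - 48)) 0) := by
  induction l with
  | nil => intro dec buf; simp
  | cons c t ih =>
    intro dec buf
    simp only [List.reverse_cons, List.foldl_append, List.foldl_cons, List.foldl_nil, ih,
      List.length_cons]
    rw [Prod.mk.injEq]
    refine ⟨by ring, ?_⟩
    rw [horner_shift t (0 * (-10) + ((c.toNat : Int) - 48))]
    simp only [parseIntA, List.foldl_cons, List.foldl_nil]
    ring

-- ===== VERDICT (by name: the statement is the Claim_ definition above) =====
theorem negaDecToDec_spec : Claim_equal_negaDecToDec := by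
  intro s _
  show negaDecToDec s = negaDecToDec_alt s
  unfold negaDecToDec negaDecToDec_alt
  rw [PySem.Str.slice?_none_none_neg_one]
  simp only [Option.getD_some, String.toList_ofList]
  rw [a_fold_eq s.toList 1 0]
  norm_num
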